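-- pv_equiv track=rewrite | github.com/vinr515/NFL-Model | Running/parallelSeason.py | outputDiv
-- ===== SOURCE A (Python) =====
-- def outputDiv(div, playoffs, winDict):
--     order = []
--     for i in playoffs:
--         if(i in div):
--             order.append(i)
--     rest = sorted([i for i in div if not i in order], key=lambda x:winDict[x], reverse=True)
--     order = order + rest
--     return order
-- ===== SOURCE B (Python) =====
-- def outputDiv(div, playoffs, winDict):
--     order = [t for t in playoffs if t in div]
--     buckets = {}
--     for t in div:
--         if t not in playoffs:
--             buckets.setdefault(winDict[t], []).append(t)
--     rest = []
--     for v in sorted(buckets, reverse=True):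
--         rest += buckets[v]
--     return order + rest
-- ===== Notes on version B (the rewrite author's own statement) =====
-- stated objective: alternative
-- what changed: Replaces A's stable reverse key-sort of the non-playoff teams by a one-pass group-by into win-count buckets followed by a sort of only the distinct win values, and A's playoff-collecting append loop by a filter comprehension.
import Mathlib
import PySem

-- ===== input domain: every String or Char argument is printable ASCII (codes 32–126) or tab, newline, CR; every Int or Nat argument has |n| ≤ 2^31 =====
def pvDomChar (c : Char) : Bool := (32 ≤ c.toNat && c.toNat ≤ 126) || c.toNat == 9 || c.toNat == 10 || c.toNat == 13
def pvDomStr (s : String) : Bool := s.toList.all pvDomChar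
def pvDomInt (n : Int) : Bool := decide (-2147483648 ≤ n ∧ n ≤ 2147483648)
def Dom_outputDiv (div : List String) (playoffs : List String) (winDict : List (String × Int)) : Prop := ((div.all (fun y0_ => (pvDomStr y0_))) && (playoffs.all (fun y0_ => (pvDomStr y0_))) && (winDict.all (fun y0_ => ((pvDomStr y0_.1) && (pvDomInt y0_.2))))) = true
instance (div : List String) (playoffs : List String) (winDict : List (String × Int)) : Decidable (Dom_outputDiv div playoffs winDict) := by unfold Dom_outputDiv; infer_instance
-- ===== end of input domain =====

-- B replaces A's stable reverse-sort of the non-playoff teams by a group-by: teams are bucketed by their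
-- win count in one pass and only the distinct win values are sorted (an alternative algorithm, same cost class).

-- ===== PORT A =====
-- winDict[x] is ported as Dict.getD … 0: exact wherever the key is present (Pre_ guarantees it;
-- in Python the missing-key case raises KeyError and is excluded by Pre_).
def outputDiv (div : List String) (playoffs : List String) (winDict : List (String × Int)) : List String :=
  let order := playoffs.foldl (fun acc i => if div.contains i then acc ++ [i] else acc) ([] : List String)
  let rest := PySem.List.sorted (div.filter (fun i => !(order.contains i)))
      (fun x => PySem.Dict.getD (PySem.Dict.mk winDict) x 0) true
  order ++ rest

-- ===== PORT B =====
-- (winDict[t] ported as Dict.getD … 0, exact under Pre_, exactly as in port A)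
def outputDiv_alt (div : List String) (playoffs : List String) (winDict : List (String × Int)) : List String :=
  let order := playoffs.filter (fun t => div.contains t)
  let buckets : PySem.Dict Int (List String) := div.foldl
    (fun d t => if !(playoffs.contains t) then
        d.modify (PySem.Dict.getD (PySem.Dict.mk winDict) t 0) [] (fun l => l ++ [t])
      else d)
    PySem.Dict.empty
  let rest := (PySem.List.sorted buckets.keys (fun v => v) true).foldl
    (fun acc v => acc ++ buckets.getD v []) []
  order ++ rest

-- ===== PRECONDITION & SPEC =====
-- Pre_ excludes exactly the inputs on which A raises KeyError: a division team outside the playoff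
-- list whose win count is missing from winDict (B raises KeyError there too).
def Pre_outputDiv (div : List String) (playoffs : List String) (winDict : List (String × Int)) : Prop :=
  ∀ t ∈ div, t ∉ playoffs → t ∈ winDict.map Prod.fst
instance (div : List String) (playoffs : List String) (winDict : List (String × Int)) : Decidable (Pre_outputDiv div playoffs winDict) := by unfold Pre_outputDiv; infer_instance

def pvWitness_outputDiv : List String × List String × (List (String × Int)) :=
  (["a", "b", "c"], ["b"], [("a", 3), ("c", 5)])

def Spec_outputDiv (div : List String) (playoffs : List String) (winDict : List (String × Int)) (out : List String) : Prop := out = outputDiv_alt div playoffs winDict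
instance (div : List String) (playoffs : List String) (winDict : List (String × Int)) (out : List String) : Decidable (Spec_outputDiv div playoffs winDict out) := by unfold Spec_outputDiv; infer_instance

-- ===== CLAIM (what is proved, stated in full; the proofs are below) =====
def Claim_equal_outputDiv : Prop := ∀ (div : List String) (playoffs : List String) (winDict : List (String × Int)), Dom_outputDiv div playoffs winDict → Pre_outputDiv div playoffs winDict → Spec_outputDiv div playoffs winDict (outputDiv div playoffs winDict)

-- ===== LEMMAS AND PROOFS =====

-- insertBy only looks at `before x ·` on the members of the list
theorem pv_insertBy_congr {α : Type} (before before' : α → α → Bool) (x : α) (ys : List α)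
    (h : ∀ y ∈ ys, before x y = before' x y) :
    PySem.List.insertBy before x ys = PySem.List.insertBy before' x ys := by
  induction ys with
  | nil => rfl
  | cons y ys ih =>
    simp only [PySem.List.insertBy]
    rw [h y (List.mem_cons_self)]
    split <;> simp_all

theorem pv_insertBy_const_false {α : Type} (x : α) (ys : List α) :
    PySem.List.insertBy (fun _ _ => false) x ys = ys ++ [x] := by
  induction ys with
  | nil => rfl
  | cons y ys ih => simp [PySem.List.insertBy, ih]

theorem pv_foldl_insertBy_congr {α : Type} (before before' : α → α → Bool) (S : List α)
    (h : ∀ a ∈ S, ∀ b ∈ S, before a b = before' a b) :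
    ∀ (xs acc : List α), (∀ x ∈ xs, x ∈ S) → (∀ a ∈ acc, a ∈ S) →
    xs.foldl (fun acc x => PySem.List.insertBy before x acc) acc
      = xs.foldl (fun acc x => PySem.List.insertBy before' x acc) acc := by
  intro xs
  induction xs with
  | nil => intro acc _ _; rfl
  | cons x xs ih =>
    intro acc hxs hacc
    simp only [List.foldl_cons]
    rw [pv_insertBy_congr before before' x acc
      (fun y hy => h x (hxs x List.mem_cons_self) y (hacc y hy))]
    exact ih _ (fun z hz => hxs z (List.mem_cons_of_mem _ hz))
      (fun a ha => by
        rcases (PySem.List.mem_insertBy before' x a acc).mp ha with h' | h'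
        · exact h' ▸ hxs x List.mem_cons_self
        · exact hacc a h')

theorem pv_insertBy_append_left {α : Type} (before : α → α → Bool) (x : α) (A B : List α)
    (h : ∀ b ∈ B, before x b = true) :
    PySem.List.insertBy before x (A ++ B) = PySem.List.insertBy before x A ++ B := by
  induction A with
  | nil =>
    cases B with
    | nil => rfl
    | cons b bs => simp [PySem.List.insertBy, h b List.mem_cons_self]
  | cons a as ih =>
    simp only [List.cons_append, PySem.List.insertBy]
    split <;> simp [ih]

theorem pv_insertBy_append_right {α : Type} (before : α → α → Bool) (x : α) (A B : List α)
    (h : ∀ a ∈ A, before x a = false) :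
    PySem.List.insertBy before x (A ++ B) = A ++ PySem.List.insertBy before x B := by
  induction A with
  | nil => rfl
  | cons a as ih =>
    simp only [List.cons_append, PySem.List.insertBy, h a List.mem_cons_self]
    simp only [Bool.false_eq_true, if_false, List.cons.injEq, true_and]
    exact ih (fun a ha => h a (List.mem_cons_of_mem _ ha))

-- a stable insertion sort whose comparison (on the elements at hand) puts group-0 elements strictly
-- before group-1 elements splits into the two sorts of the filtered sublists
theorem pv_foldl_insertBy_split {α : Type} (g : α → Bool) (before : α → α → Bool) (S : List α)
    (h01 : ∀ x ∈ S, ∀ y ∈ S, g x = true → g y = false → before x y = true)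
    (h10 : ∀ x ∈ S, ∀ y ∈ S, g x = false → g y = true → before x y = false) :
    ∀ (xs A B : List α), (∀ x ∈ xs, x ∈ S) → (∀ a ∈ A, a ∈ S) → (∀ b ∈ B, b ∈ S) →
    (∀ a ∈ A, g a = true) → (∀ b ∈ B, g b = false) →
    xs.foldl (fun acc x => PySem.List.insertBy before x acc) (A ++ B)
      = (xs.filter g).foldl (fun acc x => PySem.List.insertBy before x acc) A
        ++ (xs.filter (fun x => !g x)).foldl (fun acc x => PySem.List.insertBy before x acc) B := by
  intro xs
  induction xs with
  | nil => intro A B _ _ _ _ _; rfl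
  | cons x xs ih =>
    intro A B hxs hAS hBS hA hB
    have hxS : x ∈ S := hxs x List.mem_cons_self
    have hxs' : ∀ z ∈ xs, z ∈ S := fun z hz => hxs z (List.mem_cons_of_mem _ hz)
    by_cases hg : g x = true
    · simp only [List.foldl_cons, List.filter_cons, hg, if_pos, Bool.not_true]
      rw [pv_insertBy_append_left before x A B (fun b hb => h01 x hxS b (hBS b hb) hg (hB b hb))]
      rw [ih (PySem.List.insertBy before x A) B hxs'
        (fun a ha => by
          rcases (PySem.List.mem_insertBy before x a A).mp ha with h' | h'
          · exact h' ▸ hxS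
          · exact hAS a h') hBS
        (fun a ha => by
          rcases (PySem.List.mem_insertBy before x a A).mp ha with h' | h'
          · exact h' ▸ hg
          · exact hA a h') hB]
      simp
    · have hg' : g x = false := by simpa using hg
      simp only [List.foldl_cons, List.filter_cons, hg']
      rw [pv_insertBy_append_right before x A B (fun a ha => h10 x hxS a (hAS a ha) hg' (hA a ha))]
      rw [ih A (PySem.List.insertBy before x B) hxs' hAS
        (fun b hb => by
          rcases (PySem.List.mem_insertBy before x b B).mp hb with h' | h'
          · exact h' ▸ hxS
          · exact hBS b h')
        hA
        (fun b hb => by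
          rcases (PySem.List.mem_insertBy before x b B).mp hb with h' | h'
          · exact h' ▸ hg'
          · exact hB b h')]
      simp

-- CORE: Python's stable descending key-sort is the concatenation, over the distinct key values in
-- descending order, of the key-preimages in original order
theorem pv_sorted_rev_eq_flatMap (w : String → Int) :
    ∀ (V : List Int) (xs : List String), V.Pairwise (fun a b => b < a) → (∀ t ∈ xs, w t ∈ V) →
    PySem.List.sorted xs w true = V.flatMap (fun v => xs.filter (fun t => w t == v)) := by
  intro V
  induction V with
  | nil =>
    intro xs _ hmem
    have hxs : xs = [] := by
      cases xs with
      | nil => rfl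
      | cons a l => exact absurd (hmem a List.mem_cons_self) (by simp)
    subst hxs; rfl
  | cons v V' ih =>
    intro xs hpw hmem
    have hv' : ∀ u ∈ V', u < v := (List.pairwise_cons.mp hpw).1
    have hpw' : V'.Pairwise (fun a b => b < a) := (List.pairwise_cons.mp hpw).2
    rw [PySem.List.sorted_rev_eq_foldl_insertBy]
    have hsplit := pv_foldl_insertBy_split (fun t => w t == v) (fun a b => decide (w b < w a)) xs
      (fun x hx y hy hgx hgy => by
        have hx' : w x = v := by simpa using hgx
        have hy' : w y ∈ V' := by
          have := hmem y hy
          simp only [List.mem_cons] at this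
          rcases this with h' | h'
          · exact absurd (by simpa using h' : (w y == v) = true) (by simp [hgy])
          · exact h'
        simp [hx', hv' _ hy'])
      (fun x hx y hy hgx hgy => by
        have hy' : w y = v := by simpa using hgy
        have hx' : w x ∈ V' := by
          have := hmem x hx
          simp only [List.mem_cons] at this
          rcases this with h' | h'
          · exact absurd (by simpa using h' : (w x == v) = true) (by simp [hgx])
          · exact h'
        simp [hy']
        exact le_of_lt (hv' _ hx'))
      xs [] [] (fun x hx => hx) (by simp) (by simp) (by simp) (by simp)
    rw [List.nil_append] at hsplit
    rw [hsplit]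
    -- the equal-key group is left in original order
    have hgrp : (xs.filter (fun t => w t == v)).foldl
        (fun acc x => PySem.List.insertBy (fun a b => decide (w b < w a)) x acc) []
        = xs.filter (fun t => w t == v) := by
      rw [pv_foldl_insertBy_congr (fun a b => decide (w b < w a)) (fun _ _ => false)
        (xs.filter (fun t => w t == v))
        (fun a ha b hb => by
          have ha' : w a = v := by simpa using (List.mem_filter.mp ha).2
          have hb' : w b = v := by simpa using (List.mem_filter.mp hb).2
          simp [ha', hb'])
        (xs.filter (fun t => w t == v)) [] (fun x hx => hx) (by simp)]
      simp only [pv_insertBy_const_false]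
      rw [PySem.List.foldl_append_singleton_eq_self, List.nil_append]
    -- the rest recurses
    have hrec : (xs.filter (fun t => !(w t == v))).foldl
        (fun acc x => PySem.List.insertBy (fun a b => decide (w b < w a)) x acc) []
        = V'.flatMap (fun u => (xs.filter (fun t => !(w t == v))).filter (fun t => w t == u)) := by
      rw [← PySem.List.sorted_rev_eq_foldl_insertBy]
      exact ih (xs.filter (fun t => !(w t == v))) hpw'
        (fun t ht => by
          have htx := (List.mem_filter.mp ht).1
          have htv : ¬(w t == v) = true := by simpa using (List.mem_filter.mp ht).2
          have := hmem t htx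
          simp only [List.mem_cons] at this
          rcases this with h' | h'
          · exact absurd (by simpa using h' : (w t == v) = true) htv
          · exact h')
    rw [hgrp, hrec, List.flatMap_cons]
    congr 1
    rw [List.flatMap_def, List.flatMap_def]
    congr 1
    apply List.map_congr_left
    intro u hu
    rw [List.filter_filter]
    apply List.filter_congr
    intro t _
    by_cases htu : w t = u
    · have hne : ¬ u = v := ne_of_lt (hv' u hu)
      simp [htu, hne]
    · simp [htu]

-- bucket characterisation: value lists
theorem pv_buckets_getD (w : String → Int) (xs : List String) :
    ∀ (d : PySem.Dict Int (List String)) (v : Int),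
    (xs.foldl (fun d t => d.modify (w t) [] (fun l => l ++ [t])) d).getD v []
      = d.getD v [] ++ xs.filter (fun t => w t == v) := by
  induction xs with
  | nil => intro d v; simp
  | cons t xs ih =>
    intro d v
    simp only [List.foldl_cons, List.filter_cons]
    rw [ih]
    by_cases hv : v = w t
    · subst hv
      simp only [PySem.Dict.modify, PySem.Dict.getD, PySem.Dict.get?_insert_self]
      simp
    · have : (w t == v) = false := by simpa using fun h => hv h.symm
      rw [this]
      simp only [PySem.Dict.modify, PySem.Dict.getD,
        PySem.Dict.get?_insert_of_ne _ _ hv]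
      simp

-- bucket characterisation: every processed team's win count is a key
theorem pv_buckets_contains (w : String → Int) (xs : List String) :
    ∀ (d : PySem.Dict Int (List String)) (v : Int),
    (xs.foldl (fun d t => d.modify (w t) [] (fun l => l ++ [t])) d).contains v = true
      ↔ v ∈ xs.map w ∨ d.contains v = true := by
  induction xs with
  | nil => intro d v; simp
  | cons t xs ih =>
    intro d v
    simp only [List.foldl_cons, List.map_cons, List.mem_cons, ih,
      PySem.Dict.contains_modify, Bool.or_eq_true, beq_iff_eq]
    tauto

-- bucket characterisation: the keys stay distinct
theorem pv_buckets_keys_nodup (w : String → Int) (xs : List String) :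
    ∀ (d : PySem.Dict Int (List String)), d.keys.Nodup →
    (xs.foldl (fun d t => d.modify (w t) [] (fun l => l ++ [t])) d).keys.Nodup := by
  induction xs with
  | nil => intro d hd; exact hd
  | cons t xs ih =>
    intro d hd
    simp only [List.foldl_cons]
    exact ih _ (PySem.Dict.nodup_keys_insert d _ _ hd)

-- ===== MAIN PROOF =====
theorem outputDiv_eq (div playoffs : List String) (winDict : List (String × Int)) :
    outputDiv div playoffs winDict = outputDiv_alt div playoffs winDict := by
  set w : String → Int := fun x => PySem.Dict.getD (PySem.Dict.mk winDict) x 0 with hwdef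
  -- A's order is the same filter as B's
  have horder : playoffs.foldl (fun acc i => if div.contains i then acc ++ [i] else acc) ([] : List String)
      = playoffs.filter (fun t => div.contains t) := by
    rw [PySem.List.foldl_append_if_eq_filter, List.nil_append]
  set order : List String := playoffs.filter (fun t => div.contains t) with horderdef
  have hordmem : ∀ a, a ∈ order ↔ a ∈ playoffs ∧ a ∈ div := by
    intro a; rw [horderdef]; simp [List.mem_filter]
  -- A's rest filter is the playoffs-complement filter
  have hfilter : div.filter (fun i => !(order.contains i)) = div.filter (fun t => !(playoffs.contains t)) := by
    apply List.filter_congr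
    intro x hx
    by_cases hp : x ∈ playoffs
    · have h1' : order.contains x = true := List.contains_iff_mem.mpr ((hordmem x).mpr ⟨hp, hx⟩)
      have h2' : playoffs.contains x = true := List.contains_iff_mem.mpr hp
      rw [h1', h2']
    · have h1' : order.contains x = false := by
        rw [← Bool.not_eq_true, List.contains_iff_mem, hordmem]; tauto
      have h2' : playoffs.contains x = false := by
        rw [← Bool.not_eq_true, List.contains_iff_mem]; exact hp
      rw [h1', h2']
  set xs : List String := div.filter (fun t => !(playoffs.contains t)) with hxsdef
  -- B's bucket loop is the loop over xs
  have hbk : div.foldl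
      (fun d t => if !(playoffs.contains t) then d.modify (w t) [] (fun l => l ++ [t]) else d)
      PySem.Dict.empty
      = xs.foldl (fun d t => d.modify (w t) [] (fun l => l ++ [t])) PySem.Dict.empty := by
    rw [hxsdef, PySem.List.foldl_if_eq_foldl_filter]
  set buckets : PySem.Dict Int (List String) :=
    xs.foldl (fun d t => d.modify (w t) [] (fun l => l ++ [t])) PySem.Dict.empty with hbkdef
  set V : List Int := PySem.List.sorted buckets.keys (fun v => v) true with hVdef
  -- V is strictly descending
  have hVnodup : V.Nodup := by
    have hperm : V.Perm buckets.keys := by rw [hVdef]; exact PySem.List.sorted_perm _ _ _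
    exact hperm.symm.nodup (pv_buckets_keys_nodup w xs PySem.Dict.empty PySem.Dict.nodup_keys_empty)
  have hVpw : V.Pairwise (fun a b => b < a) := by
    have h1 : V.Pairwise (fun a b : Int => b ≤ a) := PySem.List.sorted_pairwise_rev _ _
    have h2 : V.Pairwise (fun a b : Int => a ≠ b) := hVnodup
    exact (h1.and h2).imp (fun {a b} h => lt_of_le_of_ne h.1 (Ne.symm h.2))
  -- every team in xs lands in a bucket
  have hVmem : ∀ t ∈ xs, w t ∈ V := by
    intro t ht
    have : buckets.contains (w t) = true := by
      rw [hbkdef, pv_buckets_contains]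
      exact Or.inl (List.mem_map_of_mem ht)
    have hk : w t ∈ buckets.keys := (PySem.Dict.contains_iff_mem_keys _ _).mp this
    rw [hVdef, PySem.List.mem_sorted]
    exact hk
  -- A's rest equals B's rest
  have hrest : PySem.List.sorted xs w true
      = V.foldl (fun acc v => acc ++ buckets.getD v []) [] := by
    rw [PySem.List.foldl_append_eq_flatMap, List.nil_append,
        pv_sorted_rev_eq_flatMap w V xs hVpw hVmem]
    congr 1
    funext v
    rw [hbkdef, pv_buckets_getD]
    simp
  -- assemble
  show (playoffs.foldl (fun acc i => if div.contains i then acc ++ [i] else acc) ([] : List String))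
      ++ _ = _
  rw [horder, hfilter]
  show order ++ PySem.List.sorted xs w true = outputDiv_alt div playoffs winDict
  rw [hrest]
  show _ = order ++ _
  congr 1
  rw [hbk]

-- ===== VERDICT (by name: the statement is the Claim_ definition above) =====
theorem outputDiv_spec : Claim_equal_outputDiv := by
  intro div playoffs winDict _ _
  unfold Spec_outputDiv
  exact outputDiv_eq div playoffs winDict
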